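-- pv_equiv track=rewrite | github.com/DozzzeN/SKG | chirpKey/perm3.py | precoding
-- ===== SOURCE A (Python) =====
-- def precoding(a):
--     bk_1 = [0]
--     bk = []
--     for i in range(len(a)):
--         bk.append((a[i] - bk_1[i]) % 4)
--         bk_1.append(bk[i])
--     ck = []
--     for i in range(len(a)):
--         ck.append((bk[i] + bk_1[i]) % 4)
--     return ck
-- ===== SOURCE B (Python) =====
-- def precoding(a):
--     return [x % 4 for x in a]
-- ===== Notes on version B (the rewrite author's own statement) =====
-- stated objective: simpler
-- what changed: The recurrence bk[i]=(a[i]-bk[i-1])%4 telescopes: ck[i]=((a[i]-p)%4+p)%4=a[i]%4, so B replaces the two loops and auxiliary lists with a single comprehension taking each element mod 4.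
import Mathlib
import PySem

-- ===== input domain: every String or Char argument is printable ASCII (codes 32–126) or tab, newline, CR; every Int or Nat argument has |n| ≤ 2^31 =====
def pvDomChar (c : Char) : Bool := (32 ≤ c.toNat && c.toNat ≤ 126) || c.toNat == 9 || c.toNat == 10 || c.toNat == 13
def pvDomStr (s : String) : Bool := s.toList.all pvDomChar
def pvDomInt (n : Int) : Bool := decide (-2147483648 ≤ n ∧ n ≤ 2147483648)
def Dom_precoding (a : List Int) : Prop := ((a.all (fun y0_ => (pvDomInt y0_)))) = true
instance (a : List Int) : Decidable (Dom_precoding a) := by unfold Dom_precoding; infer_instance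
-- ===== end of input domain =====

-- B collapses A's two loops and auxiliary lists to a single map x % 4 (the recurrence telescopes); objective: simpler.

-- ===== PORT A =====
-- literal transliteration of A: first loop builds bk/bk_1 by appending, second loop builds ck
def precoding (a : List Int) : List Int :=
  let s := (PySem.List.pyRange 0 (PySem.List.len a) 1).foldl
    (fun (s : List Int × List Int) i =>
      let bk' := s.2 ++ [PySem.Int.mod (PySem.List.pyGetD a i 0 - PySem.List.pyGetD s.1 i 0) 4]
      (s.1 ++ [PySem.List.pyGetD bk' i 0], bk'))
    ([0], [])
  (PySem.List.pyRange 0 (PySem.List.len a) 1).foldl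
    (fun ck i => ck ++ [PySem.Int.mod (PySem.List.pyGetD s.2 i 0 + PySem.List.pyGetD s.1 i 0) 4]) []

-- ===== PORT B =====
def precoding_alt (a : List Int) : List Int := a.map (fun x => PySem.Int.mod x 4)

-- ===== PRECONDITION & SPEC =====
def Spec_precoding (a : List Int) (out : List Int) : Prop := out = precoding_alt a
instance (a : List Int) (out : List Int) : Decidable (Spec_precoding a out) := by unfold Spec_precoding; infer_instance

-- ===== CLAIM (what is proved, stated in full; the proofs are below) =====
def Claim_equal_precoding : Prop := ∀ (a : List Int), Dom_precoding a → Spec_precoding a (precoding a)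

-- ===== LEMMAS AND PROOFS =====

-- proof helper: the bk list A's first loop has built after n iterations
def loopA (a : List Int) : Nat → List Int
  | 0 => []
  | n+1 => let q := loopA a n
           q ++ [PySem.Int.mod (a.getD n 0 - (0 :: q).getD n 0) 4]

theorem length_loopA (a : List Int) (n : Nat) : (loopA a n).length = n := by
  induction n with
  | zero => rfl
  | succ n ih => simp [loopA, ih]

theorem fold1_eq (a : List Int) (n : Nat) :
    (PySem.List.pyRange 0 (n : Int) 1).foldl
      (fun (s : List Int × List Int) i =>
        let bk' := s.2 ++ [PySem.Int.mod (PySem.List.pyGetD a i 0 - PySem.List.pyGetD s.1 i 0) 4]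
        (s.1 ++ [PySem.List.pyGetD bk' i 0], bk'))
      ([0], []) = (0 :: loopA a n, loopA a n) := by
  induction n with
  | zero => simp [PySem.List.pyRange_one_eq_nil, loopA]
  | succ n ih =>
    have h : ((n : Int) + 1) = ((n + 1 : Nat) : Int) := by push_cast; ring
    rw [← h, PySem.List.pyRange_one_succ_right (by positivity), List.foldl_append, ih]
    simp only [List.foldl_cons, List.foldl_nil]
    have hget : ∀ (l : List Int) (d : Int), PySem.List.pyGetD l (n : Int) d = l.getD n d :=
      fun l d => PySem.List.pyGetD_natCast l n d
    simp only [hget]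
    have hl := length_loopA a n
    have hx : (loopA a n ++ [PySem.Int.mod (a.getD n 0 - (0 :: loopA a n).getD n 0) 4]).getD n 0
        = PySem.Int.mod (a.getD n 0 - (0 :: loopA a n).getD n 0) 4 := by
      rw [List.getD_eq_getElem?_getD, List.getElem?_append_right (by omega)]
      simp [hl]
    rw [hx]
    simp [loopA]

theorem pointwise (a : List Int) (n : Nat) (hn : n ≤ a.length) (i : Nat) (hi : i < n) :
    PySem.Int.mod ((loopA a n).getD i 0 + (0 :: loopA a n).getD i 0) 4
      = PySem.Int.mod (a.getD i 0) 4 := by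
  induction n with
  | zero => omega
  | succ n ih =>
    have hl := length_loopA a n
    by_cases hin : i < n
    · have hq : (loopA a (n+1)).getD i 0 = (loopA a n).getD i 0 := by
        simp only [loopA]
        rw [List.getD_eq_getElem?_getD, List.getElem?_append_left (by omega),
            ← List.getD_eq_getElem?_getD]
      have hp : (0 :: loopA a (n+1)).getD i 0 = (0 :: loopA a n).getD i 0 := by
        show ((0 :: loopA a n) ++ [_]).getD i 0 = _
        rw [List.getD_eq_getElem?_getD, List.getElem?_append_left (by simp [hl]; omega),
            ← List.getD_eq_getElem?_getD]
      rw [hq, hp, ih (by omega) hin]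
    · have hie : i = n := by omega
      subst hie
      have hq : (loopA a (i+1)).getD i 0
          = PySem.Int.mod (a.getD i 0 - (0 :: loopA a i).getD i 0) 4 := by
        simp only [loopA]
        rw [List.getD_eq_getElem?_getD, List.getElem?_append_right (by omega)]
        simp [hl]
      have hp : (0 :: loopA a (i+1)).getD i 0 = (0 :: loopA a i).getD i 0 := by
        show ((0 :: loopA a i) ++ [_]).getD i 0 = _
        rw [List.getD_eq_getElem?_getD, List.getElem?_append_left (by simp [hl]),
            ← List.getD_eq_getElem?_getD]
      rw [hq, hp]
      have e4 : (0:Int) < 4 := by norm_num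
      rw [PySem.Int.mod_eq_emod_of_pos e4, PySem.Int.mod_eq_emod_of_pos e4,
          PySem.Int.mod_eq_emod_of_pos e4]
      rw [Int.emod_add_emod]
      ring_nf

-- ===== VERDICT (by name: the statement is the Claim_ definition above) =====
theorem precoding_spec : Claim_equal_precoding := by
  intro a _
  show precoding a = precoding_alt a
  unfold precoding precoding_alt
  rw [PySem.List.len_eq, fold1_eq a a.length]
  rw [PySem.List.foldl_append_singleton_eq_map]
  apply List.ext_getElem
  · simp [PySem.List.length_pyRange_one]
  · intro k h1 h2
    have hk : k < a.length := by
      simpa [PySem.List.length_pyRange_one] using h1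
    have hr : (PySem.List.pyRange 0 (a.length : Int) 1)[k]'(by
        simpa [PySem.List.length_pyRange_one] using h1) = (k : Int) := by
      rw [PySem.List.getElem_pyRange_one]; ring
    simp only [List.nil_append, List.getElem_map, hr, PySem.List.pyGetD_natCast]
    rw [pointwise a a.length le_rfl k hk]
    rw [List.getD_eq_getElem?_getD, List.getElem?_eq_getElem hk]
    rfl
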